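-- pv_equiv track=rewrite | github.com/NicolasVidalDuque/EstructuraDatos | tarea1.py | sumarValoresMatriz
-- ===== SOURCE A (Python) =====
-- def sumarValoresMatriz(mat, arr):
--     total = 0
--     for coordinate in arr:
--         x = coordinate[0]
--         y = coordinate[1]
--         if (x in mat):
--             total += returnValue(mat[x],y)
--     return total
--
-- def returnValue(arr, target):
--     for element in arr:
--         if element[0] == target:
--             return element[1]
--     return 0
-- ===== SOURCE B (Python) =====
-- def sumarValoresMatriz(mat, arr):
--     count = {}
--     for coordinate in arr:
--         count[coordinate] = count.get(coordinate, 0) + 1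
--     total = 0
--     for x in mat:
--         seen = set()
--         for element in mat[x]:
--             y = element[0]
--             if y not in seen:
--                 seen.add(y)
--                 total += count.get((x, y), 0) * element[1]
--     return total
-- ===== Notes on version B (the rewrite author's own statement) =====
-- stated objective: alternative
-- what changed: B builds a multiplicity dict of the requested coordinates in one pass over arr and then walks the matrix once driven by its own structure (per-row seen set keeps the first-match-only rule), instead of scanning a matrix row per requested coordinate.
import Mathlib
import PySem

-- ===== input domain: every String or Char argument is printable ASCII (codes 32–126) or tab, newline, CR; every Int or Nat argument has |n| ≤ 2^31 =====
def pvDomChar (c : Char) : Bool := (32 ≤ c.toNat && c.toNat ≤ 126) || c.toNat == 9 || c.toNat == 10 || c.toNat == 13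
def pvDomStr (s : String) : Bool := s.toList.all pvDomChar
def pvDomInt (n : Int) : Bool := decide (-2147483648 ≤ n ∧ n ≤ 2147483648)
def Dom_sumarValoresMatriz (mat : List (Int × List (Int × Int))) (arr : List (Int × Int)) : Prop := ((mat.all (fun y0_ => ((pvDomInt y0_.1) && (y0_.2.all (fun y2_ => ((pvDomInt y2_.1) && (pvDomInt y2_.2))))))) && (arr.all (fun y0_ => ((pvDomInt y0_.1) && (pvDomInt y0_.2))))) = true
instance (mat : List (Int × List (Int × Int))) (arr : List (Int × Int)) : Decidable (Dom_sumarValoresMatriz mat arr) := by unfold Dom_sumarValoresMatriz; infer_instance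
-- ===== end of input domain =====

-- B counts the requested coordinates once, then walks the matrix itself (per-row seen set
-- keeps the first-match rule) instead of scanning a row per requested coordinate: an
-- alternative single-walk-of-the-matrix decomposition, proved equal on dicts (distinct keys).


-- ===== PORT A =====
def returnValue (arr : List (Int × Int)) (target : Int) : Int :=
  match arr with
  | [] => 0
  | element :: rest => if element.1 = target then element.2 else returnValue rest target

def sumarValoresMatriz (mat : List (Int × List (Int × Int))) (arr : List (Int × Int)) : Int :=
  arr.foldl (fun total coordinate =>
    match mat.find? (fun p => p.1 == coordinate.1) with   -- 'if x in mat: … mat[x]' (first match = dict lookup)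
    | some row => total + returnValue row.2 coordinate.2
    | none => total) 0

-- ===== PORT B =====
-- inner 'for element in mat[x]' loop of Source B, carrying the seen set and the running total
def sumRowB (count : PySem.Dict (Int × Int) Int) (x : Int) (row : List (Int × Int))
    (seen : PySem.Set Int) (total : Int) : Int :=
  match row with
  | [] => total
  | element :: rest =>
    if PySem.Set.contains seen element.1 then sumRowB count x rest seen total
    else sumRowB count x rest (PySem.Set.add seen element.1)
          (total + PySem.Dict.getD count (x, element.1) 0 * element.2)

def sumarValoresMatriz_alt (mat : List (Int × List (Int × Int))) (arr : List (Int × Int)) : Int :=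
  let count := arr.foldl (fun d coordinate => d.insert coordinate (d.getD coordinate 0 + 1)) PySem.Dict.empty
  mat.foldl (fun total p => sumRowB count p.1 p.2 PySem.Set.empty total) 0

-- ===== PRECONDITION & SPEC =====
-- Pre_ only requires the association list standing for the Python dict `mat` to have distinct
-- keys — every Python dict satisfies this, so no input A accepts is excluded.
def Pre_sumarValoresMatriz (mat : List (Int × List (Int × Int))) (arr : List (Int × Int)) : Prop :=
  (mat.map Prod.fst).Nodup

instance (mat : List (Int × List (Int × Int))) (arr : List (Int × Int)) : Decidable (Pre_sumarValoresMatriz mat arr) := by unfold Pre_sumarValoresMatriz; infer_instance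

def pvWitness_sumarValoresMatriz : (List (Int × List (Int × Int))) × (List (Int × Int)) :=
  ([(0, [(1, 2), (1, 7), (3, 4)]), (5, [(1, 6)])], [(0, 1), (0, 1), (5, 3), (2, 1)])

def Spec_sumarValoresMatriz (mat : List (Int × List (Int × Int))) (arr : List (Int × Int)) (out : Int) : Prop := out = sumarValoresMatriz_alt mat arr
instance (mat : List (Int × List (Int × Int))) (arr : List (Int × Int)) (out : Int) : Decidable (Spec_sumarValoresMatriz mat arr out) := by unfold Spec_sumarValoresMatriz; infer_instance

-- ===== CLAIM (what is proved, stated in full; the proofs are below) =====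
def Claim_equal_sumarValoresMatriz : Prop := ∀ (mat : List (Int × List (Int × Int))) (arr : List (Int × Int)), Dom_sumarValoresMatriz mat arr → Pre_sumarValoresMatriz mat arr → Spec_sumarValoresMatriz mat arr (sumarValoresMatriz mat arr)

-- ===== LEMMAS AND PROOFS =====

-- the counter built by B's first loop reads back the multiplicity in arr
lemma countB_getD (arr : List (Int × Int)) (p : Int × Int) :
    PySem.Dict.getD (arr.foldl (fun d c => d.insert c (d.getD c 0 + 1)) PySem.Dict.empty) p 0
      = (arr.count p : Int) := by
  rw [PySem.Dict.getD_foldl_insert_add_one]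
  simp [PySem.Dict.getD, PySem.Dict.get?, PySem.Dict.empty]

-- the row loop is additive in its running total
lemma sumRowB_add (count : PySem.Dict (Int × Int) Int) (x : Int) (row : List (Int × Int)) :
    ∀ seen total, sumRowB count x row seen total = total + sumRowB count x row seen 0 := by
  induction row with
  | nil => intro seen total; simp [sumRowB]
  | cons e rest ih =>
    intro seen total
    simp only [sumRowB]
    by_cases h : PySem.Set.contains seen e.1 = true
    · simp only [h, if_true]; exact ih seen total
    · simp only [h, if_false, Bool.false_eq_true]
      rw [ih _ (total + _), ih _ (0 + _)]
      ring

-- with an all-zero counter the row loop returns its total unchanged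
lemma sumRowB_zero (d : PySem.Dict (Int × Int) Int) (h : ∀ p, d.getD p 0 = 0) (x : Int)
    (row : List (Int × Int)) : ∀ seen total, sumRowB d x row seen total = total := by
  induction row with
  | nil => intro seen total; simp [sumRowB]
  | cons e rest ih =>
    intro seen total
    simp only [sumRowB]
    by_cases hc : PySem.Set.contains seen e.1 = true
    · simp only [hc, if_true]; exact ih _ _
    · simp only [hc, if_false, Bool.false_eq_true, h]
      rw [ih]; ring

-- bumping the counter at coordinate c by one raises the row loop's result by the first
-- value stored under key c.2 — exactly A's returnValue — when the row belongs to x = c.1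
lemma sumRowB_bump (d1 d2 : PySem.Dict (Int × Int) Int) (c : Int × Int)
    (hd : ∀ p, d1.getD p 0 = d2.getD p 0 + (if p = c then 1 else 0)) (x : Int)
    (row : List (Int × Int)) :
    ∀ (seen : PySem.Set Int) (total : Int),
      sumRowB d1 x row seen total =
        sumRowB d2 x row seen total +
          (if x = c.1 ∧ PySem.Set.contains seen c.2 = false then returnValue row c.2 else 0) := by
  induction row with
  | nil =>
    intro seen total
    simp only [sumRowB, returnValue]
    split_ifs <;> ring
  | cons e rest ih =>
    intro seen total
    obtain ⟨y, v⟩ := e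
    simp only [sumRowB]
    by_cases hy : PySem.Set.contains seen y = true
    · -- duplicate key in the row: skipped by both loops
      simp only [hy, if_true]
      rw [ih seen total]
      congr 1
      by_cases hcond : x = c.1 ∧ PySem.Set.contains seen c.2 = false
      · have hne : ¬ (y = c.2) := by
          intro h; rw [h, hcond.2] at hy; exact Bool.false_ne_true hy
        rw [if_pos hcond, if_pos hcond]
        simp [returnValue, hne]
      · rw [if_neg hcond, if_neg hcond]
    · simp only [hy, if_false, Bool.false_eq_true]
      rw [ih, hd (x, y)]
      by_cases hpc : (x, y) = c
      · -- first occurrence of the requested coordinate: the bump contributes exactly v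
        have hx : x = c.1 := congrArg Prod.fst hpc
        have hyc : y = c.2 := congrArg Prod.snd hpc
        have hseen : PySem.Set.contains seen c.2 = false := by
          rw [← hyc]; exact (Bool.not_eq_true _).mp hy
        have hy' : y ∉ seen := by simpa [PySem.Set.contains] using hy
        have hadd : PySem.Set.contains (PySem.Set.add seen y) c.2 = true := by
          rw [← hyc]; simp [PySem.Set.contains, PySem.Set.add, hy']
        rw [if_pos hpc, hadd]
        rw [sumRowB_add d2 x rest (PySem.Set.add seen y)
              (total + (PySem.Dict.getD d2 (x, y) 0 + 1) * v),
            sumRowB_add d2 x rest (PySem.Set.add seen y)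
              (total + PySem.Dict.getD d2 (x, y) 0 * v)]
        simp only [returnValue]
        rw [if_neg (by simp : ¬ (x = c.1 ∧ (true : Bool) = false)),
            if_pos ⟨hx, hseen⟩, if_pos hyc]
        ring
      · rw [if_neg hpc, add_zero]
        congr 1
        by_cases hx : x = c.1
        · have hyc : ¬ (y = c.2) := by
            intro h
            exact hpc (by rw [hx, h])
          have hy' : y ∉ seen := by simpa [PySem.Set.contains] using hy
          have hcy : ¬ (c.2 = y) := fun h => hyc h.symm
          have hcc : PySem.Set.contains (PySem.Set.add seen y) c.2 = PySem.Set.contains seen c.2 := by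
            simp [PySem.Set.contains, PySem.Set.add, hy', hcy]
          rw [hcc]
          by_cases hs : x = c.1 ∧ PySem.Set.contains seen c.2 = false
          · rw [if_pos hs, if_pos hs]
            simp [returnValue, hyc]
          · rw [if_neg hs, if_neg hs]
        · rw [if_neg (fun h => hx h.1), if_neg (fun h => hx h.1)]

-- B's outer loop over the matrix rows, as a function of the counter and the start total
def matFoldB (count : PySem.Dict (Int × Int) Int) (mat : List (Int × List (Int × Int))) (t : Int) : Int :=
  mat.foldl (fun total p => sumRowB count p.1 p.2 PySem.Set.empty total) t

lemma alt_eq_matFoldB (mat : List (Int × List (Int × Int))) (arr : List (Int × Int)) :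
    sumarValoresMatriz_alt mat arr =
      matFoldB (arr.foldl (fun d c => d.insert c (d.getD c 0 + 1)) PySem.Dict.empty) mat 0 := rfl

lemma matFoldB_add (count : PySem.Dict (Int × Int) Int) (mat : List (Int × List (Int × Int))) :
    ∀ t, matFoldB count mat t = t + matFoldB count mat 0 := by
  induction mat with
  | nil => intro t; simp [matFoldB]
  | cons p rest ih =>
    intro t
    have e1 : matFoldB count (p :: rest) t = matFoldB count rest (sumRowB count p.1 p.2 PySem.Set.empty t) := rfl
    have e2 : matFoldB count (p :: rest) 0 = matFoldB count rest (sumRowB count p.1 p.2 PySem.Set.empty 0) := rfl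
    rw [e1, e2, ih, sumRowB_add, ih (sumRowB count p.1 p.2 PySem.Set.empty 0)]
    ring

lemma matFoldB_zero (d : PySem.Dict (Int × Int) Int) (h : ∀ p, d.getD p 0 = 0)
    (mat : List (Int × List (Int × Int))) : ∀ t, matFoldB d mat t = t := by
  induction mat with
  | nil => intro t; rfl
  | cons p rest ih =>
    intro t
    have e1 : matFoldB d (p :: rest) t = matFoldB d rest (sumRowB d p.1 p.2 PySem.Set.empty t) := rfl
    rw [e1, sumRowB_zero d h, ih]

-- bumping the counter at c raises B's matrix walk by exactly A's lookup of c (unique keys)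
lemma matFoldB_bump (d1 d2 : PySem.Dict (Int × Int) Int) (c : Int × Int)
    (hd : ∀ p, d1.getD p 0 = d2.getD p 0 + (if p = c then 1 else 0)) :
    ∀ (mat : List (Int × List (Int × Int))), (mat.map Prod.fst).Nodup → ∀ t,
      matFoldB d1 mat t =
        matFoldB d2 mat t +
          (match mat.find? (fun p => p.1 == c.1) with
           | some row => returnValue row.2 c.2
           | none => 0) := by
  intro mat
  induction mat with
  | nil => intro _ t; simp [matFoldB]
  | cons q rest ih =>
    intro hnod t
    have hnod' : (rest.map Prod.fst).Nodup := (List.nodup_cons.mp hnod).2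
    have hq : q.1 ∉ rest.map Prod.fst := (List.nodup_cons.mp hnod).1
    have e1 : matFoldB d1 (q :: rest) t = matFoldB d1 rest (sumRowB d1 q.1 q.2 PySem.Set.empty t) := rfl
    have e2 : matFoldB d2 (q :: rest) t = matFoldB d2 rest (sumRowB d2 q.1 q.2 PySem.Set.empty t) := rfl
    rw [e1, e2, sumRowB_bump d1 d2 c hd]
    have hemp : PySem.Set.contains (PySem.Set.empty : PySem.Set Int) c.2 = false := rfl
    rw [hemp]
    by_cases hx : q.1 = c.1
    · have hfind : (q :: rest).find? (fun p => p.1 == c.1) = some q := by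
        simp [hx]
      have hrest : rest.find? (fun p => p.1 == c.1) = none := by
        rw [List.find?_eq_none]
        intro p hp
        simp only [beq_iff_eq]
        intro hcontra
        exact hq (hx ▸ hcontra ▸ List.mem_map_of_mem hp)
      rw [hfind]
      rw [ih hnod' _, hrest]
      simp only [hx, if_true, and_true]
      rw [matFoldB_add d2 rest (sumRowB d2 c.1 q.2 PySem.Set.empty t),
          matFoldB_add d2 rest (sumRowB d2 c.1 q.2 PySem.Set.empty t + returnValue q.2 c.2)]
      ring
    · have hfind : (q :: rest).find? (fun p => p.1 == c.1) = rest.find? (fun p => p.1 == c.1) := by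
        simp [hx]
      rw [hfind]
      simp only [hx, false_and, if_false]
      rw [ih hnod' _]
      ring

-- the heart of the equivalence: induction over arr from the right
lemma main_eq (mat : List (Int × List (Int × Int))) (hk : (mat.map Prod.fst).Nodup) :
    ∀ arr : List (Int × Int), sumarValoresMatriz mat arr = sumarValoresMatriz_alt mat arr := by
  intro arr
  induction arr using List.reverseRecOn with
  | nil =>
    rw [alt_eq_matFoldB]
    rw [matFoldB_zero _ (fun p => by rw [countB_getD]; simp)]
    rfl
  | append_singleton arr c ih =>
    -- A side: one extra lookup of c
    rw [show sumarValoresMatriz mat (arr ++ [c]) =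
        (match mat.find? (fun p => p.1 == c.1) with
         | some row => sumarValoresMatriz mat arr + returnValue row.2 c.2
         | none => sumarValoresMatriz mat arr) from by
      simp only [sumarValoresMatriz, List.foldl_append, List.foldl_cons, List.foldl_nil]]
    -- B side: the counter gains one occurrence of c
    rw [alt_eq_matFoldB, List.foldl_append, List.foldl_cons, List.foldl_nil]
    have hd : ∀ p : Int × Int,
        PySem.Dict.getD ((arr.foldl (fun d c => d.insert c (d.getD c 0 + 1)) (PySem.Dict.empty : PySem.Dict (Int × Int) Int)).insert c
          ((arr.foldl (fun d c => d.insert c (d.getD c 0 + 1)) (PySem.Dict.empty : PySem.Dict (Int × Int) Int)).getD c 0 + 1)) p 0 =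
        PySem.Dict.getD (arr.foldl (fun d c => d.insert c (d.getD c 0 + 1)) (PySem.Dict.empty : PySem.Dict (Int × Int) Int)) p 0 +
          (if p = c then 1 else 0) := by
      intro p
      rw [PySem.Dict.getD_insert]
      by_cases hp : p = c
      · simp [hp]
      · simp [hp]
    rw [matFoldB_bump _ _ c hd mat hk 0]
    rw [← alt_eq_matFoldB, ← ih]
    cases hfind : mat.find? (fun p => p.1 == c.1) <;> simp

-- ===== VERDICT (by name: the statement is the Claim_ definition above) =====
theorem sumarValoresMatriz_spec : Claim_equal_sumarValoresMatriz := by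
  intro mat arr _ hpre
  unfold Spec_sumarValoresMatriz
  exact main_eq mat hpre arr
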